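-- pv_equiv track=rewrite | github.com/Erotemic/ubelt | dev/bench_first_generator.py | loop_first
-- ===== SOURCE A (Python) =====
-- from typing import Iterable, Tuple, TypeVar
--
-- T = TypeVar("T")
--
-- def loop_first(values: Iterable[T]) -> Iterable[Tuple[bool, T]]:
--     """Iterate and generate a tuple with a flag for first value."""
--     iter_values = iter(values)
--     try:
--         value = next(iter_values)
--     except StopIteration:
--         return
--     yield True, value
--     for value in iter_values:
--         yield False, value
-- ===== SOURCE B (Python) =====
-- from typing import Iterable, Tuple, TypeVar
--
-- T = TypeVar("T")
--
-- def loop_first(values: Iterable[T]) -> Iterable[Tuple[bool, T]]: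
--     """Iterate and generate a tuple with a flag for first value."""
--     for i, value in enumerate(values):
--         yield i == 0, value
-- ===== Notes on version B (the rewrite author's own statement) =====
-- stated objective: simpler
-- what changed: Replaced the peel-the-head next()/StopIteration pattern (separate first yield plus tail loop) with one flat enumerate loop that emits i == 0 as the flag.
import Mathlib
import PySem

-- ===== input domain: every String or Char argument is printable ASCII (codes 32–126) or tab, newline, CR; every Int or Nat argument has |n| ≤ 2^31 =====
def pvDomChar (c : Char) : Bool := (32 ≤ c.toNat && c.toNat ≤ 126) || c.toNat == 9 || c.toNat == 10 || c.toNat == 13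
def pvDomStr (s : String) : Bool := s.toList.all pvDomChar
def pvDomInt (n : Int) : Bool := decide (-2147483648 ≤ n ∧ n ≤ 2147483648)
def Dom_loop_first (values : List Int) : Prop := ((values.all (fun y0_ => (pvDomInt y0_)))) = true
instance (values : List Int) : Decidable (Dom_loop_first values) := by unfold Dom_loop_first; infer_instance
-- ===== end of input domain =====

-- B replaces A's peel-the-head next()/StopIteration pattern with one flat enumerate loop (flag = i == 0): simpler.


-- ===== PORT A =====
-- A peels the first element, yields (True, v), then yields (False, v) for the rest.
def loop_first (values : List Int) : List (Bool × Int) :=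
  match values with
  | [] => []
  | value :: iter_values => (true, value) :: iter_values.map (fun value => (false, value))

-- ===== PORT B =====
-- B: one flat enumerate loop, flag is i == 0.
def loop_first_alt (values : List Int) : List (Bool × Int) :=
  (PySem.List.enumerate values).map (fun p => (p.1 == 0, p.2))

-- ===== PRECONDITION & SPEC =====
def Spec_loop_first (values : List Int) (out : List (Bool × Int)) : Prop := out = loop_first_alt values
instance (values : List Int) (out : List (Bool × Int)) : Decidable (Spec_loop_first values out) := by unfold Spec_loop_first; infer_instance

-- ===== CLAIM (what is proved, stated in full; the proofs are below) =====
def Claim_equal_loop_first : Prop := ∀ (values : List Int), Dom_loop_first values → Spec_loop_first values (loop_first values)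

-- ===== LEMMAS AND PROOFS =====
theorem loop_first_alt_tail (vs : List Int) (s : Int) (hs : 1 ≤ s) :
    (PySem.List.enumerate vs s).map (fun p => (p.1 == 0, p.2)) = vs.map (fun v => (false, v)) := by
  induction vs generalizing s with
  | nil => simp [PySem.List.enumerate_nil]
  | cons v vs ih =>
    have hs0 : (s == 0) = false := by simp; omega
    simp [PySem.List.enumerate_cons, ih (s+1) (by omega), hs0]


-- ===== VERDICT (by name: the statement is the Claim_ definition above) =====
theorem loop_first_spec : Claim_equal_loop_first := by
  intro values _
  unfold Spec_loop_first loop_first loop_first_alt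
  cases values with
  | nil => simp [PySem.List.enumerate_nil]
  | cons v vs =>
    simp [PySem.List.enumerate_cons, loop_first_alt_tail vs 1 le_rfl]
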